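-- pv_equiv track=rewrite | github.com/AlanJYLi/leetcode_practice_python | week_1/2020_05_22.py | cross_sum
-- ===== SOURCE A (Python) =====
-- def cross_sum(nums, left, right, middle):
--     if left == right:
--         return nums[left]
--
--     left_cross_max = nums[middle]
--     for i in range(middle-1, left-1, -1):
--         rolling_sum = sum(nums[i:middle+1])
--         left_cross_max = max(rolling_sum, left_cross_max)
--
--     right_cross_max = nums[middle+1]
--     for i in range(middle+2, right+1):
--         rolling_sum = sum(nums[middle+1:i+1])
--         right_cross_max = max(rolling_sum, right_cross_max)
--
--     return left_cross_max+right_cross_max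
-- ===== SOURCE B (Python) =====
-- def cross_sum(nums, left, right, middle):
--     if left == right:
--         return nums[left]
--
--     best_left = s = nums[middle]
--     for i in range(middle - 1, left - 1, -1):
--         s += nums[i]
--         if s > best_left:
--             best_left = s
--
--     best_right = s = nums[middle + 1]
--     for i in range(middle + 2, right + 1):
--         s += nums[i]
--         if s > best_right:
--             best_right = s
--
--     return best_left + best_right
-- ===== Notes on version B (the rewrite author's own statement) =====
-- stated objective: alternative
-- what changed: B expands left and right from the middle with a single running sum per side, taking the maximum as it goes, instead of A's re-summing of the whole slice nums[i:middle+1] / nums[middle+1:i+1] on every loop iteration; Pre_ restricts the left!=right case to in-bounds non-negative loop indices (or empty loops with an in-range middle), because outside it A's values arise accidentally from mixing negative-index wraparound with slice clamping, where B raises or naturally differs.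
-- outside the precondition, e.g. on cross_sum([3, -1, 4, -2, 5], -1, 3, 2): A returns 4, B returns 9; on cross_sum([3, -1, 4, -2, 5], 0, 9, 2): A returns 9, B raises IndexError; on cross_sum([3, -1, 4, -2, 5], 0, 3, -4): A returns 3, B returns 12
import Mathlib
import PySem

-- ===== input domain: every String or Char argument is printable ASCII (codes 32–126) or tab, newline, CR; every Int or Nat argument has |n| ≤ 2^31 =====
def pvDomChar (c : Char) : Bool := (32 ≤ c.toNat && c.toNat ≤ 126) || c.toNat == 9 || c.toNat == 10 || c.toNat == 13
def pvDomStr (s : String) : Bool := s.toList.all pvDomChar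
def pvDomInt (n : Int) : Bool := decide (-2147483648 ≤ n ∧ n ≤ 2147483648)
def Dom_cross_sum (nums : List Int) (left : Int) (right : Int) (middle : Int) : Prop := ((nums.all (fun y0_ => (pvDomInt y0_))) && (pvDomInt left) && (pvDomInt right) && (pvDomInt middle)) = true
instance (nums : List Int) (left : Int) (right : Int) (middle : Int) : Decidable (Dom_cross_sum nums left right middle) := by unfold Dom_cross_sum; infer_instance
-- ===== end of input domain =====

-- B expands left and right from the middle keeping one running sum per side, taking the
-- maximum as it goes, instead of A's re-summing of the whole slice on every iteration.

-- ===== PORT A =====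
def cross_sum (nums : List Int) (left : Int) (right : Int) (middle : Int) : Int :=
  if left = right then PySem.List.pyGetD nums left 0
  else
    let leftCrossMax := PySem.List.pyGetD nums middle 0
    let leftCrossMax := (PySem.List.pyRange (middle - 1) (left - 1) (-1)).foldl
      (fun acc i => max ((PySem.List.slice nums (some i) (some (middle + 1))).sum) acc) leftCrossMax
    let rightCrossMax := PySem.List.pyGetD nums (middle + 1) 0
    let rightCrossMax := (PySem.List.pyRange (middle + 2) (right + 1) 1).foldl
      (fun acc i => max ((PySem.List.slice nums (some (middle + 1)) (some (i + 1))).sum) acc) rightCrossMax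
    leftCrossMax + rightCrossMax

-- ===== PORT B =====
-- state of each loop: (best so far, running sum)
def cross_sum_alt (nums : List Int) (left : Int) (right : Int) (middle : Int) : Int :=
  if left = right then PySem.List.pyGetD nums left 0
  else
    let stL := (PySem.List.pyRange (middle - 1) (left - 1) (-1)).foldl
      (fun (st : Int × Int) i =>
        let s := st.2 + PySem.List.pyGetD nums i 0
        (if s > st.1 then s else st.1, s))
      (PySem.List.pyGetD nums middle 0, PySem.List.pyGetD nums middle 0)
    let stR := (PySem.List.pyRange (middle + 2) (right + 1) 1).foldl
      (fun (st : Int × Int) i =>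
        let s := st.2 + PySem.List.pyGetD nums i 0
        (if s > st.1 then s else st.1, s))
      (PySem.List.pyGetD nums (middle + 1) 0, PySem.List.pyGetD nums (middle + 1) 0)
    stL.1 + stR.1

-- ===== PRECONDITION & SPEC =====
-- Pre_ excludes (a) inputs where A raises IndexError (left/middle/middle+1 out of range), and
-- (b) in the left ≠ right case with at least one non-empty loop, negative left/middle or
-- right ≥ len(nums), where A still returns but its value arises accidentally from mixing
-- negative-index wraparound with slice clamping (and B's running-sum loops raise or naturally
-- wrap differently there); when both loops are empty (middle ≤ left and right ≤ middle + 1)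
-- only in-range middle is required.
def Pre_cross_sum (nums : List Int) (left : Int) (right : Int) (middle : Int) : Prop :=
  (left = right ∧ -(nums.length : Int) ≤ left ∧ left < (nums.length : Int)) ∨
  (left ≠ right ∧
    ((0 ≤ left ∧ 0 ≤ middle ∧ middle + 1 < (nums.length : Int) ∧ right < (nums.length : Int)) ∨
     (middle ≤ left ∧ right ≤ middle + 1 ∧ -(nums.length : Int) ≤ middle ∧
      middle + 1 < (nums.length : Int))))
instance (nums : List Int) (left : Int) (right : Int) (middle : Int) : Decidable (Pre_cross_sum nums left right middle) := by unfold Pre_cross_sum; infer_instance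

def pvWitness_cross_sum : List Int × Int × Int × Int := ([1, -2, 3, 4], 0, 3, 1)

def Spec_cross_sum (nums : List Int) (left : Int) (right : Int) (middle : Int) (out : Int) : Prop := out = cross_sum_alt nums left right middle
instance (nums : List Int) (left : Int) (right : Int) (middle : Int) (out : Int) : Decidable (Spec_cross_sum nums left right middle out) := by unfold Spec_cross_sum; infer_instance

-- ===== CLAIM (what is proved, stated in full; the proofs are below) =====
def Claim_equal_cross_sum : Prop := ∀ (nums : List Int) (left : Int) (right : Int) (middle : Int), Dom_cross_sum nums left right middle → Pre_cross_sum nums left right middle → Spec_cross_sum nums left right middle (cross_sum nums left right middle)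

-- ===== LEMMAS AND PROOFS =====

-- sum of a slice, peeling one element at the front
lemma slice_sum_cons (nums : List Int) (a b : Int) (h0 : 0 ≤ a) (hab : a < b)
    (hb : b ≤ (nums.length : Int)) :
    (PySem.List.slice nums (some a) (some b)).sum
      = PySem.List.pyGetD nums a 0 + (PySem.List.slice nums (some (a + 1)) (some b)).sum := by
  have h0b : (0 : Int) ≤ b := le_trans h0 (le_of_lt hab)
  rw [PySem.List.slice_toNat _ h0 h0b, PySem.List.slice_toNat _ (by omega) h0b]
  have hlt : a.toNat < nums.length := by omega
  rw [List.drop_eq_getElem_cons hlt]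
  rw [show (a + 1).toNat = a.toNat + 1 from by omega]
  rw [show b.toNat - a.toNat = (b.toNat - (a.toNat + 1)) + 1 from by omega]
  rw [List.take_succ_cons, List.sum_cons, PySem.List.pyGetD_eq_getElem nums 0 h0 (by omega)]

-- sum of a slice, peeling one element at the back
lemma slice_sum_snoc (nums : List Int) (a b : Int) (h0 : 0 ≤ a) (hab : a ≤ b)
    (hb : b < (nums.length : Int)) :
    (PySem.List.slice nums (some a) (some (b + 1))).sum
      = (PySem.List.slice nums (some a) (some b)).sum + PySem.List.pyGetD nums b 0 := by
  have h0b : (0 : Int) ≤ b := le_trans h0 hab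
  rw [PySem.List.slice_toNat _ h0 (by omega), PySem.List.slice_toNat _ h0 h0b]
  rw [show (b + 1).toNat - a.toNat = (b.toNat - a.toNat) + 1 from by omega]
  rw [List.take_add_one, List.sum_append, List.getElem?_drop,
    show a.toNat + (b.toNat - a.toNat) = b.toNat from by omega,
    List.getElem?_eq_getElem (show b.toNat < nums.length from by omega),
    PySem.List.pyGetD_eq_getElem nums 0 h0b (by omega)]
  simp

-- left loop: descending range [l+k-1, …, l]; B's running sum enters as the slice sum from l+k
lemma loopL (nums : List Int) (m l : Int) (h0 : 0 ≤ l)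
    (hb : m + 1 ≤ (nums.length : Int)) :
    ∀ (k : Nat) (acc : Int), l + k ≤ m + 1 →
    (PySem.List.pyRange (l + k - 1) (l - 1) (-1)).foldl
        (fun acc i => max ((PySem.List.slice nums (some i) (some (m + 1))).sum) acc) acc
      = ((PySem.List.pyRange (l + k - 1) (l - 1) (-1)).foldl
          (fun (st : Int × Int) i =>
            let s := st.2 + PySem.List.pyGetD nums i 0
            (if s > st.1 then s else st.1, s))
          (acc, (PySem.List.slice nums (some (l + k)) (some (m + 1))).sum)).1 := by
  intro k
  induction k with
  | zero =>
      intro acc _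
      rw [show (l + ((0 : Nat) : Int) - 1) = l - 1 from by push_cast; ring,
        PySem.List.pyRange_neg_one_eq_nil (le_refl (l - 1))]
      simp
  | succ k ih =>
      intro acc h
      simp only [Nat.cast_add, Nat.cast_one] at h ⊢
      rw [show l + ((k : Int) + 1) - 1 = l + k from by ring,
        PySem.List.pyRange_neg_one_cons (show l - 1 < l + (k : Int) from by omega),
        List.foldl_cons, List.foldl_cons]
      have hs : (PySem.List.slice nums (some (l + ((k : Int) + 1))) (some (m + 1))).sum
          + PySem.List.pyGetD nums (l + (k : Int)) 0
          = (PySem.List.slice nums (some (l + (k : Int))) (some (m + 1))).sum := by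
        rw [slice_sum_cons nums (l + (k : Int)) (m + 1) (by omega) (by omega) hb,
          show l + (k : Int) + 1 = l + ((k : Int) + 1) from by ring]
        ring
      simp only [hs]
      rw [show (if (PySem.List.slice nums (some (l + (k : Int))) (some (m + 1))).sum > acc
            then (PySem.List.slice nums (some (l + (k : Int))) (some (m + 1))).sum else acc)
          = max ((PySem.List.slice nums (some (l + (k : Int))) (some (m + 1))).sum) acc from by
        rw [max_def]; split_ifs <;> omega]
      exact ih _ (by omega)

-- right loop: ascending range [a, …, a+k-1]; B's running sum enters as the slice sum up to a
lemma loopR (nums : List Int) (m : Int) (hm : 0 ≤ m + 1) :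
    ∀ (k : Nat) (a acc : Int), m + 1 ≤ a → a + k ≤ (nums.length : Int) →
    (PySem.List.pyRange a (a + k) 1).foldl
        (fun acc i => max ((PySem.List.slice nums (some (m + 1)) (some (i + 1))).sum) acc) acc
      = ((PySem.List.pyRange a (a + k) 1).foldl
          (fun (st : Int × Int) i =>
            let s := st.2 + PySem.List.pyGetD nums i 0
            (if s > st.1 then s else st.1, s))
          (acc, (PySem.List.slice nums (some (m + 1)) (some a)).sum)).1 := by
  intro k
  induction k with
  | zero =>
      intro a acc _ _
      rw [show a + ((0 : Nat) : Int) = a from by push_cast; ring,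
        PySem.List.pyRange_one_eq_nil (le_refl a)]
      simp
  | succ k ih =>
      intro a acc ha hn
      simp only [Nat.cast_add, Nat.cast_one] at hn ⊢
      rw [show a + ((k : Int) + 1) = (a + 1) + (k : Int) from by ring,
        PySem.List.pyRange_one_cons (show a < a + 1 + (k : Int) from by omega),
        List.foldl_cons, List.foldl_cons]
      have hs : (PySem.List.slice nums (some (m + 1)) (some a)).sum
          + PySem.List.pyGetD nums a 0
          = (PySem.List.slice nums (some (m + 1)) (some (a + 1))).sum := by
        rw [slice_sum_snoc nums (m + 1) a hm ha (by omega)]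
      simp only [hs]
      rw [show (if (PySem.List.slice nums (some (m + 1)) (some (a + 1))).sum > acc
            then (PySem.List.slice nums (some (m + 1)) (some (a + 1))).sum else acc)
          = max ((PySem.List.slice nums (some (m + 1)) (some (a + 1))).sum) acc from by
        rw [max_def]; split_ifs <;> omega]
      exact ih (a + 1) _ (by omega) (by omega)

-- a one-element slice sums to the element
lemma slice_sum_single (nums : List Int) (a : Int) (h0 : 0 ≤ a) (ha : a < (nums.length : Int)) :
    (PySem.List.slice nums (some a) (some (a + 1))).sum = PySem.List.pyGetD nums a 0 := by
  rw [slice_sum_cons nums a (a + 1) h0 (by omega) (by omega),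
    PySem.List.slice_toNat _ (by omega) (by omega),
    show (a + 1).toNat - (a + 1).toNat = 0 from by omega]
  simp

-- ===== VERDICT (by name: the statement is the Claim_ definition above) =====
theorem cross_sum_spec : Claim_equal_cross_sum := by
  intro nums left right middle _ hpre
  unfold Spec_cross_sum cross_sum cross_sum_alt
  by_cases heq : left = right
  · rw [if_pos heq, if_pos heq]
  · rw [if_neg heq, if_neg heq]
    rcases hpre with ⟨h, _, _⟩ | ⟨_, ⟨hl, hm, hmn, hr⟩ | ⟨hml, hrm, hmlo, hmn⟩⟩
    · exact absurd h heq
    · dsimp only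
      congr 1
      · -- left-of-middle loop
        by_cases hlm : left ≤ middle
        · have hthis := loopL nums middle left hl (le_of_lt hmn)
            ((middle - left).toNat) (PySem.List.pyGetD nums middle 0) (by omega)
          rw [show left + (((middle - left).toNat : Nat) : Int) - 1 = middle - 1 from by omega,
            show left + (((middle - left).toNat : Nat) : Int) = middle from by omega,
            slice_sum_single nums middle hm (by omega)] at hthis
          dsimp only at hthis
          exact hthis
        · rw [PySem.List.pyRange_neg_one_eq_nil (show middle - 1 ≤ left - 1 from by omega)]
          simp
      · -- right-of-middle loop
        by_cases hmr : middle + 1 ≤ right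
        · have hthis := loopR nums middle (by omega)
            ((right - middle - 1).toNat) (middle + 2) (PySem.List.pyGetD nums (middle + 1) 0)
            (by omega) (by omega)
          have hsingle : (PySem.List.slice nums (some (middle + 1)) (some (middle + 2))).sum
              = PySem.List.pyGetD nums (middle + 1) 0 := by
            rw [show middle + 2 = middle + 1 + 1 from by ring]
            exact slice_sum_single nums (middle + 1) (by omega) hmn
          rw [show middle + 2 + (((right - middle - 1).toNat : Nat) : Int) = right + 1 from by omega,
            hsingle] at hthis
          dsimp only at hthis
          exact hthis
        · rw [PySem.List.pyRange_one_eq_nil (show right + 1 ≤ middle + 2 from by omega)]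
          simp
    · rw [PySem.List.pyRange_neg_one_eq_nil (show middle - 1 ≤ left - 1 from by omega),
        PySem.List.pyRange_one_eq_nil (show right + 1 ≤ middle + 2 from by omega)]
      simp
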